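-- pv_equiv track=rewrite | github.com/maniraja1/Python | proj1/Python-Test1/windows_morsels.py | window2
-- ===== SOURCE A (Python) =====
-- def window2(iterable, n,fill=None):
--     """Return list of tuples of items in given iterable and next n-1 items."""
--     items = []
--     current = ()
--     for item in iterable:
--         if len(current) < n:
--             current = current + (item,)
--         else:
--             current = current[1:] + (item,)
--         if len(current) == n:
--             items.append(current)
--     if len(current) < n:
--         '''current = current + ((fill,)*(n-len(current)))'''
--         current = *current,*(fill,)*(n-len(current))
--         items.append(current)
--     return items
-- ===== SOURCE B (Python) =====
-- def window2(iterable, n, fill=None):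
--     """Return list of tuples of items in given iterable and next n-1 items."""
--     lst = list(iterable)
--     m = len(lst)
--     if n <= 0:
--         return []
--     if m < n:
--         return [tuple(lst) + (fill,) * (n - m)]
--     return [tuple(lst[i:i + n]) for i in range(m - n + 1)]
-- ===== Notes on version B (the rewrite author's own statement) =====
-- stated objective: simpler
-- what changed: Replaces the incremental rolling-tuple buffer (grow, then shift-by-one, with an append condition checked per item) by direct index-slicing of the materialized list, with the short-input padding case handled up front as a single expression.
-- outside the precondition, e.g. on window2([], 1, None): A returns [(None,)], B returns [(None,)]; on window2([1, 2], 5, None): A returns [(1, 2, None, None, None)], B returns [(1, 2, None, None, None)]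
import Mathlib
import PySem

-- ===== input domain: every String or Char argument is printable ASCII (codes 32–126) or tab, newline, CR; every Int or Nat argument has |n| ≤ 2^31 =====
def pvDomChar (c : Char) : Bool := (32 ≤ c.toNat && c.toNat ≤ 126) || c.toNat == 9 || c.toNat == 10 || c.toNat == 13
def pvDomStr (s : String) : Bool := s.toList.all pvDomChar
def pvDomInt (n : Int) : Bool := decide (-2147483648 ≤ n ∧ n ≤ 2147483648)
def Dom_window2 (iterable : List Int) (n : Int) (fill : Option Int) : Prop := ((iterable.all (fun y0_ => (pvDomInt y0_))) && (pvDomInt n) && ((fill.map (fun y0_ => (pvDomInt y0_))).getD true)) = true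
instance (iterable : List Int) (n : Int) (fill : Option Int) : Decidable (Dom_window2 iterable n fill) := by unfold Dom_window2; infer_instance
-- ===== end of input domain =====

-- B changes A's incremental rolling-buffer loop into direct index-slicing of the
-- materialized list (objective: simpler).  Equivalence of the RETURN value only.

-- ===== PORT A =====
-- loop body of A: update 'current', then maybe append it to 'items'
def window2Step (n : Int) (st : List (List Int) × List Int) (item : Int) :
    List (List Int) × List Int :=
  let current := if (st.2.length : Int) < n then st.2 ++ [item] else st.2.tail ++ [item]
  -- current[1:] on a list is exactly List.tail
  let items := if (current.length : Int) = n then st.1 ++ [current] else st.1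
  (items, current)

def window2 (iterable : List Int) (n : Int) (fill : Option Int) : List (List Int) :=
  let s := iterable.foldl (window2Step n) ([], [])
  if (s.2.length : Int) < n then
    -- Python pads with 'fill' itself; 'fill.getD 0' is only reached with fill = some
    -- under Pre_window2, where it is exact
    s.1 ++ [s.2 ++ List.replicate (n - s.2.length).toNat (fill.getD 0)]
  else s.1

-- ===== PORT B =====
def window2_alt (iterable : List Int) (n : Int) (fill : Option Int) : List (List Int) :=
  let lst := iterable
  let m := lst.length
  if n ≤ 0 then []
  else if (m : Int) < n then
    [lst ++ List.replicate (n - m).toNat (fill.getD 0)]  -- (fill,)*(n-m); exact under Pre_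
  else
    -- [tuple(lst[i:i+n]) for i in range(m - n + 1)]
    (List.range (m - n.toNat + 1)).map (fun i => (lst.drop i).take n.toNat)

-- ===== PRECONDITION & SPEC =====
-- Pre_ excludes inputs where padding occurs with fill=None (n > 0 and fewer items
-- than n): there the Python result contains None inside a tuple of ints, which is
-- not a value of the declared List Int window type.
def Pre_window2 (iterable : List Int) (n : Int) (fill : Option Int) : Prop :=
  fill = none → (n ≤ (iterable.length : Int) ∨ n ≤ 0)
instance (iterable : List Int) (n : Int) (fill : Option Int) : Decidable (Pre_window2 iterable n fill) := by unfold Pre_window2; infer_instance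
def pvWitness_window2 : List Int × Int × Option Int := ([1, 2, 3], 2, none)

def Spec_window2 (iterable : List Int) (n : Int) (fill : Option Int) (out : List (List Int)) : Prop := out = window2_alt iterable n fill
instance (iterable : List Int) (n : Int) (fill : Option Int) (out : List (List Int)) : Decidable (Spec_window2 iterable n fill out) := by unfold Spec_window2; infer_instance

-- ===== CLAIM (what is proved, stated in full; the proofs are below) =====
def Claim_equal_window2 : Prop := ∀ (iterable : List Int) (n : Int) (fill : Option Int), Dom_window2 iterable n fill → Pre_window2 iterable n fill → Spec_window2 iterable n fill (window2 iterable n fill)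

-- ===== LEMMAS AND PROOFS =====

-- With n ≤ 0, A never appends a window: 'items' stays []
theorem window2_foldl_nonpos (n : Int) (hn : n ≤ 0) :
    ∀ (l c : List Int) (acc : List (List Int)),
      (l.foldl (window2Step n) (acc, c)).1 = acc := by
  intro l
  induction l with
  | nil => intro c acc; simp
  | cons x xs ih =>
    intro c acc
    rw [List.foldl_cons]
    have h1 : ¬ ((c.length : Int) < n) := by
      have : (0 : Int) ≤ (c.length : Int) := by positivity
      omega
    have hcur : ¬ (((c.tail ++ [x]).length : Int) = n) := by
      simp only [List.length_append, List.length_cons]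
      have : (0 : Int) ≤ (c.tail.length : Int) := by positivity
      push_cast
      omega
    simp only [window2Step, if_neg h1, if_neg hcur]
    exact ih _ _

-- With 0 < n, A's fold state after processing l is: all full windows of l so far,
-- and the last min(|l|, n) items of l
theorem window2_foldl_pos (n : Int) (hn : 0 < n) (l : List Int) :
    l.foldl (window2Step n) ([], []) =
      if l.length < n.toNat then ([], l)
      else ((List.range (l.length - n.toNat + 1)).map (fun i => (l.drop i).take n.toNat),
            l.drop (l.length - n.toNat)) := by
  set k := n.toNat with hk
  have hkn : (k : Int) = n := Int.toNat_of_nonneg (by omega)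
  have hk1 : 1 ≤ k := by omega
  induction l using List.reverseRecOn with
  | nil => simp; omega
  | append_singleton l x ih =>
    rw [List.foldl_append, List.foldl_cons, List.foldl_nil, ih]
    by_cases hlen : l.length < k
    · rw [if_pos hlen]
      have hlt : ((l.length : Int) < n) := by omega
      by_cases hfull : l.length + 1 = k
      · have hcond : (((l ++ [x]).length : Int) = n) := by
          simp only [List.length_append, List.length_cons, List.length_nil]
          push_cast; omega
        simp only [window2Step, if_pos hlt, if_pos hcond]
        rw [if_neg (show ¬ ((l ++ [x]).length < k) by simp; omega)]
        have h1 : (l ++ [x]).length - k + 1 = 1 := by simp; omega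
        have h2 : (l ++ [x]).length - k = 0 := by simp; omega
        rw [h1, h2]
        simp only [List.range_one, List.map_cons, List.map_nil, List.drop_zero]
        rw [List.take_of_length_le (by simp; omega)]
        simp
      · have hcond : ¬ (((l ++ [x]).length : Int) = n) := by
          simp only [List.length_append, List.length_cons, List.length_nil]
          push_cast; omega
        simp only [window2Step, if_pos hlt, if_neg hcond]
        rw [if_pos (show (l ++ [x]).length < k by simp; omega)]
    · rw [if_neg hlen]
      have hlk : k ≤ l.length := by omega
      have hdlen : (l.drop (l.length - k)).length = k := by
        rw [List.length_drop]; omega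
      have hnotlt : ¬ (((l.drop (l.length - k)).length : Int) < n) := by
        rw [hdlen]; omega
      have hcurlen : ((l.drop (l.length - k)).tail ++ [x]).length = k := by
        simp only [List.length_append, List.length_tail, hdlen, List.length_cons,
          List.length_nil]
        omega
      have hcond : ((((l.drop (l.length - k)).tail ++ [x]).length : Int) = n) := by
        rw [hcurlen]; omega
      simp only [window2Step, if_neg hnotlt, if_pos hcond]
      rw [if_neg (show ¬ ((l ++ [x]).length < k) by simp; omega)]
      have hcur : (l.drop (l.length - k)).tail ++ [x] = (l ++ [x]).drop ((l ++ [x]).length - k) := by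
        rw [List.tail_drop, List.length_append]
        simp only [List.length_cons, List.length_nil]
        rw [List.drop_append_of_le_length (by omega),
          show l.length + 1 - k = l.length - k + 1 by omega]
      rw [Prod.mk.injEq]
      refine ⟨?_, ?_⟩
      · -- the appended windows list: the old windows, then the new current
        have hrange : (l ++ [x]).length - k + 1 = (l.length - k + 1) + 1 := by
          simp; omega
        conv_rhs => rw [hrange, List.range_succ]
        rw [List.map_append, List.map_cons, List.map_nil]
        congr 1
        · -- old windows unchanged: for i ≤ l.length - k the slice avoids x
          apply List.map_congr_left
          intro i hi
          rw [List.mem_range] at hi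
          rw [List.drop_append_of_le_length (by omega),
              List.take_append_of_le_length (by rw [List.length_drop]; omega)]
        · -- the new window is the new current (already of length k)
          have hAB : (l ++ [x]).length - k = l.length - k + 1 := by simp; omega
          rw [hcur, hAB,
            List.take_of_length_le (by rw [List.length_drop]; simp; omega)]
      · exact hcur

-- ===== VERDICT (by name: the statement is the Claim_ definition above) =====
theorem window2_spec : Claim_equal_window2 := by
  unfold Claim_equal_window2
  intro iterable n fill _hdom hpre
  unfold Spec_window2 window2 window2_alt
  by_cases hn : n ≤ 0
  · -- items stays empty and the final pad branch is not taken
    have h1 := window2_foldl_nonpos n hn iterable [] []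
    have h2 : ¬ (((iterable.foldl (window2Step n) ([], [])).2.length : Int) < n) := by
      have : (0 : Int) ≤ ((iterable.foldl (window2Step n) ([], [])).2.length : Int) := by
        positivity
      omega
    simp only [if_neg h2, if_pos hn, h1]
  · push_neg at hn
    rw [window2_foldl_pos n hn iterable]
    by_cases hm : iterable.length < n.toNat
    · rw [if_pos hm]
      rw [if_pos (show ((iterable.length : Int) < n) by omega)]
      rw [if_neg (by omega), if_pos (by omega)]
      simp
    · rw [if_neg hm]
      have h2 : ¬ (((iterable.drop (iterable.length - n.toNat)).length : Int) < n) := by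
        rw [List.length_drop]; omega
      rw [if_neg h2, if_neg (by omega), if_neg (by omega)]
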